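-- pv_equiv track=rewrite | github.com/jetbrains99cents/BoardDefectChecker | modules/image_processing.py | calculate_x_distances
-- ===== SOURCE A (Python) =====
-- def calculate_x_distances(boxes):
--     """Calculate the minimum and maximum x distances between boxes."""
--     if len(boxes) < 2:
--         return None, None  # Not enough boxes to calculate distances
--
--     x_values = [box[0] for box in boxes]  # Extract x values
--     min_x = min(x_values)
--     max_x = max(x_values)
--
--     # Calculate distances
--     distances = []
--     for i in range(len(x_values)):
--         for j in range(i + 1, len(x_values)):
--             distances.append(abs(x_values[i] - x_values[j]))
--
--     if distances:
--         min_distance = min(distances)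
--         max_distance = max(distances)
--     else:
--         min_distance = max_distance = None
--
--     return min_distance, max_distance
-- ===== SOURCE B (Python) =====
-- def calculate_x_distances(boxes):
--     """Calculate the minimum and maximum x distances between boxes."""
--     if len(boxes) < 2:
--         return None, None  # Not enough boxes to calculate distances
--     xs = sorted(box[0] for box in boxes)
--     min_distance = min(b - a for a, b in zip(xs, xs[1:]))
--     return min_distance, xs[-1] - xs[0]
-- ===== Notes on version B (the rewrite author's own statement) =====
-- stated objective: faster
-- what changed: Instead of materialising all O(n^2) pairwise |xi-xj| distances and scanning them, B sorts the x-values once: the maximum pairwise distance is max-min and the minimum is the smallest adjacent gap in the sorted order.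
import Mathlib
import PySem

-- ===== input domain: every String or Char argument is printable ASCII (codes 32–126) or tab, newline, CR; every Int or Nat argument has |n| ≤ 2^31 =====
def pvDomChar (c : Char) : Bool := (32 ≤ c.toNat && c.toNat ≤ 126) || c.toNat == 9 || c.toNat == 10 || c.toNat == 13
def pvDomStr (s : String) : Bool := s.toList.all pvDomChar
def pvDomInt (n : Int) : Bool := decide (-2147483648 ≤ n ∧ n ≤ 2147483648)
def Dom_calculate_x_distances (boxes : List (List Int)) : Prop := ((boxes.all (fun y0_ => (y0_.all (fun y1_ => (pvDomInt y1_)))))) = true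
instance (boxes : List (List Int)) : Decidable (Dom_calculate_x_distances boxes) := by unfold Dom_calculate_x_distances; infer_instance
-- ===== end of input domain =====

-- B sorts the x-values once: max pairwise distance = max - min, min = smallest adjacent gap
-- (O(n log n) instead of A's O(n^2) list of all pairwise distances).


-- ===== PORT A =====
def calculate_x_distances (boxes : List (List Int)) : Option Int × Option Int :=
  if boxes.length < 2 then (none, none)
  else
    let x_values := boxes.map (fun box => (PySem.List.pyGet? box 0).getD 0)   -- box[0]; Pre_ keeps boxes nonempty
    let _min_x := PySem.List.min? x_values (fun x => x)
    let _max_x := PySem.List.max? x_values (fun x => x)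
    let distances :=
      (PySem.List.pyRange 0 (PySem.List.len x_values) 1).foldl (fun acc i =>
        (PySem.List.pyRange (i + 1) (PySem.List.len x_values) 1).foldl (fun acc2 j =>
          acc2 ++ [|PySem.List.pyGetD x_values i 0 - PySem.List.pyGetD x_values j 0|]) acc) []
    if distances ≠ [] then
      (PySem.List.min? distances (fun x => x), PySem.List.max? distances (fun x => x))
    else (none, none)

-- ===== PORT B =====
def calculate_x_distances_alt (boxes : List (List Int)) : Option Int × Option Int :=
  if boxes.length < 2 then (none, none)
  else
    let xs := PySem.List.sorted (boxes.map (fun box => (PySem.List.pyGet? box 0).getD 0)) (fun x => x) false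
    let min_distance := PySem.List.min? (List.zipWith (fun a b => b - a) xs (xs.drop 1)) (fun x => x)
    (min_distance, some ((PySem.List.pyGet? xs (-1)).getD 0 - (PySem.List.pyGet? xs 0).getD 0))

-- ===== PRECONDITION & SPEC =====
-- Pre_ excludes inputs with 2 or more boxes where some box is an empty list: there Python A
-- raises IndexError on box[0] (so does B).
def Pre_calculate_x_distances (boxes : List (List Int)) : Prop :=
  boxes.length < 2 ∨ ∀ b ∈ boxes, b ≠ []
instance (boxes : List (List Int)) : Decidable (Pre_calculate_x_distances boxes) := by
  unfold Pre_calculate_x_distances; infer_instance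
def pvWitness_calculate_x_distances : List (List Int) := [[3], [10], [6]]

def Spec_calculate_x_distances (boxes : List (List Int)) (out : Option Int × Option Int) : Prop := out = calculate_x_distances_alt boxes
instance (boxes : List (List Int)) (out : Option Int × Option Int) : Decidable (Spec_calculate_x_distances boxes out) := by unfold Spec_calculate_x_distances; infer_instance

-- ===== CLAIM (what is proved, stated in full; the proofs are below) =====
def Claim_equal_calculate_x_distances : Prop := ∀ (boxes : List (List Int)), Dom_calculate_x_distances boxes → Pre_calculate_x_distances boxes → Spec_calculate_x_distances boxes (calculate_x_distances boxes)

-- ===== LEMMAS AND PROOFS =====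

-- membership via getD positions
lemma pvMemIff (l : List Int) (x : Int) : x ∈ l ↔ ∃ i, i < l.length ∧ l.getD i 0 = x := by
  rw [List.mem_iff_getElem]
  constructor
  · rintro ⟨i, hi, rfl⟩; exact ⟨i, hi, List.getD_eq_getElem l 0 hi⟩
  · rintro ⟨i, hi, h⟩; exact ⟨i, hi, by rw [← List.getD_eq_getElem l 0 hi, h]⟩

lemma pvMono (l : List Int) (hs : l.Pairwise (· ≤ ·)) (p q : Nat) (hpq : p ≤ q) (hq : q < l.length) :
    l.getD p 0 ≤ l.getD q 0 := by
  rcases Nat.eq_or_lt_of_le hpq with rfl | hlt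
  · exact le_refl _
  · rw [List.getD_eq_getElem l 0 (lt_trans hlt hq), List.getD_eq_getElem l 0 hq]
    exact List.pairwise_iff_getElem.mp hs p q _ _ hlt

lemma pvCountPos (l : List Int) (x : Int) : ∀ i j, i < j → j < l.length →
    l.getD i 0 = x → l.getD j 0 = x → 2 ≤ l.count x := by
  induction l with
  | nil => intro i j _ hj _ _; simp at hj
  | cons y t ih =>
    intro i j hij hj hi hjx
    cases i with
    | zero =>
      obtain ⟨j', rfl⟩ : ∃ j', j = j' + 1 := ⟨j - 1, by omega⟩
      simp only [List.getD_cons_zero] at hi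
      simp only [List.getD_cons_succ] at hjx
      have hmem : x ∈ t := (pvMemIff t x).mpr ⟨j', by simpa using hj, hjx⟩
      have := List.count_pos_iff.mpr hmem
      rw [hi, List.count_cons_self]; omega
    | succ i' =>
      obtain ⟨j', rfl⟩ : ∃ j', j = j' + 1 := ⟨j - 1, by omega⟩
      simp only [List.getD_cons_succ] at hi hjx
      have := ih i' j' (by omega) (by simpa using hj) hi hjx
      exact le_trans this List.count_le_count_cons

lemma pvPosOfCount (l : List Int) (x : Int) : 2 ≤ l.count x →
    ∃ i j, i < j ∧ j < l.length ∧ l.getD i 0 = x ∧ l.getD j 0 = x := by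
  induction l with
  | nil => intro h; simp at h
  | cons y t ih =>
    intro h
    by_cases hy : y = x
    · have hc : 1 ≤ t.count x := by rw [hy, List.count_cons_self] at h; omega
      obtain ⟨k, hk, hkx⟩ := (pvMemIff t x).mp (List.count_pos_iff.mp hc)
      exact ⟨0, k + 1, by omega, by simpa using hk, by simp [hy], by simpa using hkx⟩
    · have hc : 2 ≤ t.count x := by rwa [List.count_cons_of_ne hy] at h
      obtain ⟨i, j, hij, hj, hi, hjx⟩ := ih hc
      exact ⟨i + 1, j + 1, by omega, by simpa using hj, by simpa using hi, by simpa using hjx⟩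

lemma pvPairPerm (src tgt : List Int) (h : src.Perm tgt) (a b : Nat) (hab : a < b) (hb : b < src.length) :
    ∃ i j, i < j ∧ j < tgt.length ∧ |tgt.getD i 0 - tgt.getD j 0| = |src.getD a 0 - src.getD b 0| := by
  by_cases huv : src.getD a 0 = src.getD b 0
  · have hcnt : 2 ≤ tgt.count (src.getD a 0) := by
      rw [← h.count_eq]; exact pvCountPos src _ a b hab hb (rfl) huv.symm
    obtain ⟨i, j, hij, hj, hi, hjx⟩ := pvPosOfCount tgt _ hcnt
    exact ⟨i, j, hij, hj, by rw [hi, hjx, ← huv]⟩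
  · have hu : src.getD a 0 ∈ tgt := h.mem_iff.mp ((pvMemIff src _).mpr ⟨a, by omega, rfl⟩)
    have hv : src.getD b 0 ∈ tgt := h.mem_iff.mp ((pvMemIff src _).mpr ⟨b, hb, rfl⟩)
    obtain ⟨p, hp, hpx⟩ := (pvMemIff tgt _).mp hu
    obtain ⟨q, hq, hqx⟩ := (pvMemIff tgt _).mp hv
    have hpq : p ≠ q := fun e => huv (by rw [← hpx, ← hqx, e])
    rcases Nat.lt_or_ge p q with hlt | hge
    · exact ⟨p, q, hlt, hq, by rw [hpx, hqx]⟩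
    · exact ⟨q, p, by omega, hp, by rw [hpx, hqx, abs_sub_comm]⟩

-- smallest adjacent gap bounds every sorted-pair difference
lemma pvGapLB (ys : List Int) (hs : ys.Pairwise (· ≤ ·)) (m : Int)
    (hlb : ∀ g ∈ List.zipWith (fun a b => b - a) ys (ys.drop 1), m ≤ g) :
    ∀ q p : Nat, p < q → q < ys.length → m ≤ ys.getD q 0 - ys.getD p 0 := by
  intro q
  induction q with
  | zero => intro p hp _; omega
  | succ q ih =>
    intro p hp hq
    have hgap : ys.getD (q + 1) 0 - ys.getD q 0 ∈ List.zipWith (fun a b => b - a) ys (ys.drop 1) := by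
      have hql : q < (List.zipWith (fun a b : Int => b - a) ys (ys.drop 1)).length := by
        simp [List.length_zipWith]; omega
      have hmem := List.getElem_mem hql
      have he : (List.zipWith (fun a b : Int => b - a) ys (ys.drop 1))[q]'hql
          = ys.getD (q + 1) 0 - ys.getD q 0 := by
        rw [List.getElem_zipWith, List.getElem_drop, List.getD_eq_getElem ys 0 hq,
          List.getD_eq_getElem ys 0 (by omega : q < ys.length)]
        have h1 : 1 + q = q + 1 := by omega
        simp [h1]
      rwa [he] at hmem
    rcases Nat.lt_or_ge p q with hlt | hge
    · have h1 := ih p hlt (by omega)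
      have h2 : ys.getD q 0 ≤ ys.getD (q+1) 0 := pvMono ys hs q (q+1) (by omega) hq
      omega
    · have : p = q := by omega
      subst this
      have := hlb _ hgap
      omega

-- gap membership: every element of the zipWith is an adjacent difference
lemma pvGapMem (ys : List Int) (g : Int) :
    g ∈ List.zipWith (fun a b => b - a) ys (ys.drop 1) →
    ∃ k, k + 1 < ys.length ∧ g = ys.getD (k + 1) 0 - ys.getD k 0 := by
  intro hg
  obtain ⟨k, hk, hkg⟩ := List.mem_iff_getElem.mp hg
  have hkl : k + 1 < ys.length := by
    simp [List.length_zipWith] at hk; omega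
  refine ⟨k, hkl, ?_⟩
  rw [← hkg, List.getElem_zipWith, List.getElem_drop, List.getD_eq_getElem ys 0 hkl,
    List.getD_eq_getElem ys 0 (by omega : k < ys.length)]
  have h1 : 1 + k = k + 1 := by omega
  simp [h1]

-- A's nested loops build exactly the flatMap of pairwise absolute differences
lemma pvDistEq (xv : List Int) :
    (PySem.List.pyRange 0 (PySem.List.len xv) 1).foldl (fun acc i =>
      (PySem.List.pyRange (i + 1) (PySem.List.len xv) 1).foldl (fun acc2 j =>
        acc2 ++ [|PySem.List.pyGetD xv i 0 - PySem.List.pyGetD xv j 0|]) acc) [] =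
    (PySem.List.pyRange 0 (PySem.List.len xv) 1).flatMap (fun i =>
      (PySem.List.pyRange (i + 1) (PySem.List.len xv) 1).map
        (fun j => |PySem.List.pyGetD xv i 0 - PySem.List.pyGetD xv j 0|)) := by
  simp only [PySem.List.foldl_append_singleton_eq_map]
  rw [PySem.List.foldl_append_eq_flatMap]
  simp

lemma pvMemDist (xv : List Int) (d : Int) :
    d ∈ (PySem.List.pyRange 0 (PySem.List.len xv) 1).flatMap (fun i =>
      (PySem.List.pyRange (i + 1) (PySem.List.len xv) 1).map
        (fun j => |PySem.List.pyGetD xv i 0 - PySem.List.pyGetD xv j 0|)) ↔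
    ∃ p q : Nat, p < q ∧ q < xv.length ∧ d = |xv.getD p 0 - xv.getD q 0| := by
  simp only [List.mem_flatMap, List.mem_map, PySem.List.mem_pyRange_one, PySem.List.len_eq]
  constructor
  · rintro ⟨i, ⟨hi0, hin⟩, j, ⟨hij, hjn⟩, hd⟩
    refine ⟨i.toNat, j.toNat, by omega, by omega, ?_⟩
    rw [← hd, PySem.List.pyGetD_of_nonneg xv 0 hi0, PySem.List.pyGetD_of_nonneg xv 0 (by omega : (0:Int) ≤ j)]
  · rintro ⟨p, q, hpq, hq, hd⟩
    refine ⟨(p : Int), ⟨by omega, by exact_mod_cast by omega⟩,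
      (q : Int), ⟨by exact_mod_cast hpq, by exact_mod_cast hq⟩, ?_⟩
    rw [PySem.List.pyGetD_natCast, PySem.List.pyGetD_natCast, hd]

lemma pvAbsGetD (ys : List Int) (hs : ys.Pairwise (· ≤ ·)) (a b : Nat) (hab : a ≤ b) (hb : b < ys.length) :
    |ys.getD a 0 - ys.getD b 0| = ys.getD b 0 - ys.getD a 0 := by
  have := pvMono ys hs a b hab hb
  rw [abs_sub_comm, abs_of_nonneg (by omega)]

lemma pvDistNe (xv : List Int) (hn : 2 ≤ xv.length) :
    (PySem.List.pyRange 0 (PySem.List.len xv) 1).flatMap (fun i =>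
      (PySem.List.pyRange (i + 1) (PySem.List.len xv) 1).map
        (fun j => |PySem.List.pyGetD xv i 0 - PySem.List.pyGetD xv j 0|)) ≠ [] :=
  List.ne_nil_of_mem ((pvMemDist xv _).mpr ⟨0, 1, by omega, by omega, rfl⟩)

lemma pvMinEq (xv : List Int) (hn : 2 ≤ xv.length) :
    PySem.List.min? ((PySem.List.pyRange 0 (PySem.List.len xv) 1).flatMap (fun i =>
      (PySem.List.pyRange (i + 1) (PySem.List.len xv) 1).map
        (fun j => |PySem.List.pyGetD xv i 0 - PySem.List.pyGetD xv j 0|))) (fun x => x) =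
    PySem.List.min? (List.zipWith (fun a b => b - a) (PySem.List.sorted xv (fun x => x) false)
      ((PySem.List.sorted xv (fun x => x) false).drop 1)) (fun x => x) := by
  set ys := PySem.List.sorted xv (fun x => x) false with hys
  set dists := (PySem.List.pyRange 0 (PySem.List.len xv) 1).flatMap (fun i =>
      (PySem.List.pyRange (i + 1) (PySem.List.len xv) 1).map
        (fun j => |PySem.List.pyGetD xv i 0 - PySem.List.pyGetD xv j 0|)) with hdists
  set gaps := List.zipWith (fun a b => b - a) ys (ys.drop 1) with hgaps
  have hperm : ys.Perm xv := PySem.List.sorted_perm xv (fun x => x) false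
  have hpair : ys.Pairwise (· ≤ ·) := PySem.List.sorted_pairwise xv (fun x => x)
  have hyl : ys.length = xv.length := PySem.List.length_sorted xv (fun x => x) false
  have hgne : gaps ≠ [] := by
    apply List.ne_nil_of_length_pos
    rw [hgaps, List.length_zipWith, List.length_drop]
    omega
  obtain ⟨m, hm⟩ : ∃ m, PySem.List.min? gaps (fun x => x) = some m := by
    cases h : PySem.List.min? gaps (fun x => x) with
    | none => exact absurd ((PySem.List.min?_eq_none_iff gaps _).mp h) hgne
    | some m => exact ⟨m, rfl⟩
  obtain ⟨md, hmd⟩ : ∃ md, PySem.List.min? dists (fun x => x) = some md := by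
    cases h : PySem.List.min? dists (fun x => x) with
    | none => exact absurd ((PySem.List.min?_eq_none_iff dists _).mp h) (pvDistNe xv hn)
    | some md => exact ⟨md, rfl⟩
  rw [hm, hmd]
  congr 1
  -- md ≤ m : m is an adjacent gap, hence a pairwise distance of xv
  obtain ⟨k, hk, hmk⟩ := pvGapMem ys m (PySem.List.min?_mem hm)
  obtain ⟨i, j, hij, hj, hval⟩ := pvPairPerm ys xv hperm k (k + 1) (by omega) hk
  have hmem : m ∈ dists := (pvMemDist xv m).mpr ⟨i, j, hij, hj, by
    rw [hval, pvAbsGetD ys hpair k (k + 1) (by omega) hk, ← hmk]⟩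
  have h1 : md ≤ m := PySem.List.min?_isMin hmd m hmem
  -- m ≤ md : md is |xv p - xv q|, realised as a sorted pair difference ≥ smallest gap
  obtain ⟨p, q, hpq, hq, hmdv⟩ := (pvMemDist xv md).mp (PySem.List.min?_mem hmd)
  obtain ⟨a, b, hab, hb, hval2⟩ := pvPairPerm xv ys hperm.symm p q hpq hq
  have h2 : m ≤ md := by
    have hlb := pvGapLB ys hpair m (fun g hg => PySem.List.min?_isMin hm g hg) b a hab hb
    rw [hmdv, ← hval2, pvAbsGetD ys hpair a b (by omega) hb]
    exact hlb
  omega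

lemma pvMaxEq (xv : List Int) (hn : 2 ≤ xv.length) :
    PySem.List.max? ((PySem.List.pyRange 0 (PySem.List.len xv) 1).flatMap (fun i =>
      (PySem.List.pyRange (i + 1) (PySem.List.len xv) 1).map
        (fun j => |PySem.List.pyGetD xv i 0 - PySem.List.pyGetD xv j 0|))) (fun x => x) =
    some (((PySem.List.pyGet? (PySem.List.sorted xv (fun x => x) false) (-1)).getD 0) -
          ((PySem.List.pyGet? (PySem.List.sorted xv (fun x => x) false) 0).getD 0)) := by
  set ys := PySem.List.sorted xv (fun x => x) false with hys
  set dists := (PySem.List.pyRange 0 (PySem.List.len xv) 1).flatMap (fun i =>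
      (PySem.List.pyRange (i + 1) (PySem.List.len xv) 1).map
        (fun j => |PySem.List.pyGetD xv i 0 - PySem.List.pyGetD xv j 0|)) with hdists
  have hperm : ys.Perm xv := PySem.List.sorted_perm xv (fun x => x) false
  have hpair : ys.Pairwise (· ≤ ·) := PySem.List.sorted_pairwise xv (fun x => x)
  have hyl : ys.length = xv.length := PySem.List.length_sorted xv (fun x => x) false
  obtain ⟨Md, hMd⟩ : ∃ Md, PySem.List.max? dists (fun x => x) = some Md := by
    cases h : PySem.List.max? dists (fun x => x) with
    | none => exact absurd ((PySem.List.max?_eq_none_iff dists _).mp h) (pvDistNe xv hn)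
    | some Md => exact ⟨Md, rfl⟩
  -- rewrite B's endpoints as getD values
  have hlast : (PySem.List.pyGet? ys (-1)).getD 0 = ys.getD (ys.length - 1) 0 := by
    rw [PySem.List.pyGet?_neg_one, List.getLast?_eq_getElem?, ← List.getD_eq_getElem?_getD]
  have hhead : (PySem.List.pyGet? ys 0).getD 0 = ys.getD 0 0 := by
    rw [PySem.List.pyGet?_zero, ← List.getD_eq_getElem?_getD]
  rw [hMd, hlast, hhead]
  congr 1
  -- the endpoint difference is a pairwise distance, so ≤ Md
  obtain ⟨i, j, hij, hj, hval⟩ := pvPairPerm ys xv hperm 0 (ys.length - 1) (by omega) (by omega)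
  have hmem : ys.getD (ys.length - 1) 0 - ys.getD 0 0 ∈ dists := (pvMemDist xv _).mpr
    ⟨i, j, hij, hj, by rw [hval, pvAbsGetD ys hpair 0 (ys.length - 1) (by omega) (by omega)]⟩
  have h1 := PySem.List.max?_isMax hMd _ hmem
  -- Md is |xv p - xv q| = a sorted pair difference ≤ endpoint difference
  obtain ⟨p, q, hpq, hq, hMdv⟩ := (pvMemDist xv Md).mp (PySem.List.max?_mem hMd)
  obtain ⟨a, b, hab, hb, hval2⟩ := pvPairPerm xv ys hperm.symm p q hpq hq
  have h2 : Md ≤ ys.getD (ys.length - 1) 0 - ys.getD 0 0 := by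
    have e1 := pvMono ys hpair 0 a (by omega) (by omega)
    have e2 := pvMono ys hpair b (ys.length - 1) (by omega) (by omega)
    rw [hMdv, ← hval2, pvAbsGetD ys hpair a b (by omega) hb]
    omega
  omega

-- ===== VERDICT (by name: the statement is the Claim_ definition above) =====
theorem calculate_x_distances_spec : Claim_equal_calculate_x_distances := by
  intro boxes _ _
  unfold Spec_calculate_x_distances calculate_x_distances calculate_x_distances_alt
  by_cases hlen : boxes.length < 2
  · rw [if_pos hlen, if_pos hlen]
  · rw [if_neg hlen, if_neg hlen]
    have hn : 2 ≤ (boxes.map (fun box => (PySem.List.pyGet? box 0).getD 0)).length := by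
      rw [List.length_map]; omega
    simp only []
    rw [pvDistEq]
    rw [if_pos (pvDistNe _ hn)]
    rw [pvMinEq _ hn, pvMaxEq _ hn]
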